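-- pv_equiv track=rewrite | github.com/usbsta/chordsync | backend/services/transcription.py | _group_ug_lines
-- ===== SOURCE A (Python) =====
-- def _group_ug_lines(
--     pairs: list[tuple[str | None, str, bool]],
-- ) -> list[list[tuple[str | None, str]]]:
--     """Split flat (chord, word, is_line_start) list back into per-line sublists."""
--     lines: list[list[tuple[str | None, str]]] = []
--     current: list[tuple[str | None, str]] = []
--     for chord, word, is_start in pairs:
--         if is_start and current:
--             lines.append(current)
--             current = []
--         current.append((chord, word))
--     if current:
--         lines.append(current)
--     return lines
-- ===== SOURCE B (Python) =====
-- def _group_ug_lines(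
--     pairs: list[tuple[str | None, str, bool]],
-- ) -> list[list[tuple[str | None, str]]]:
--     """Split flat (chord, word, is_line_start) list back into per-line sublists,
--     by two-pointer span scanning: each line is the slice from its first element
--     to the next flagged element."""
--     lines: list[list[tuple[str | None, str]]] = []
--     i, n = 0, len(pairs)
--     while i < n:
--         j = i + 1
--         while j < n and not pairs[j][2]:
--             j += 1
--         lines.append([(c, w) for c, w, _ in pairs[i:j]])
--         i = j
--     return lines
-- ===== Notes on version B (the rewrite author's own statement) =====
-- stated objective: alternative
-- what changed: Replaces A's single fold that maintains and flushes a buffer with a two-pointer span scan: an outer loop fixes the start index of each line, an inner scan finds the next flagged index, and the line is produced by slicing pairs[i:j] directly.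
import Mathlib
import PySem

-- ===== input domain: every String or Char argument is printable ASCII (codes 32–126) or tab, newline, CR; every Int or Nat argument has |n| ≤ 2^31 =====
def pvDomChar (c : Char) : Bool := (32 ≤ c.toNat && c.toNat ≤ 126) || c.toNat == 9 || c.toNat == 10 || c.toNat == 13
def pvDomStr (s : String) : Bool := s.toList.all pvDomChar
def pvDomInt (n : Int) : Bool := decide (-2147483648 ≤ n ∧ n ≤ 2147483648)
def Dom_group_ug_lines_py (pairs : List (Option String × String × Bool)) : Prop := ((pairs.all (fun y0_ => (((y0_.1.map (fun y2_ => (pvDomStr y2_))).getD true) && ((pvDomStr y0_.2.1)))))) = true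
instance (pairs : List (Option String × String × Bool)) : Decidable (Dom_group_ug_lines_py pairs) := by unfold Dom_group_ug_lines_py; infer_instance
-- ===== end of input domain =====

-- B replaces A's buffer-and-flush fold with a two-pointer span scan (outer loop over start
-- indices, inner scan to the next flagged index, slice the line out); objective: alternative, same cost.

-- ===== PORT A =====
-- forward loop: flush `current` into `lines` when a start flag meets a non-empty buffer
def group_ug_lines_py (pairs : List (Option String × String × Bool)) : List (List (Option String × String)) :=
  let st := pairs.foldl
    (fun (st : List (List (Option String × String)) × List (Option String × String)) p =>
      let (lines, current) := st
      let (chord, word, is_start) := p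
      if is_start && !current.isEmpty then
        (lines ++ [current], [(chord, word)])
      else
        (lines, current ++ [(chord, word)]))
    ([], [])
  if st.2.isEmpty then st.1 else st.1 ++ [st.2]

-- ===== PORT B =====
-- inner while loop of Source B: `while j < n and not pairs[j][2]: j += 1`
-- (pairs[j]?.getD is exact here: the index j is only read after the `j < n` test succeeds)
def pvScan (pairs : List (Option String × String × Bool)) (n j : Nat) : Nat :=
  if _h : j < n ∧ !((pairs[j]?.getD (none, "", true)).2.2) then pvScan pairs n (j + 1) else j
termination_by n - j
decreasing_by omega

-- j = pvScan … j' is ≥ j' (the inner while only moves forward); cited by pvOuter's decreasing_by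
theorem pvScan_ge (pairs : List (Option String × String × Bool)) (n : Nat) :
    ∀ j, j ≤ pvScan pairs n j := by
  intro j
  induction j using pvScan.induct pairs n with
  | case1 j _h ih => rw [pvScan, dif_pos _h]; omega
  | case2 j _h => rw [pvScan, dif_neg _h]

-- outer while loop of Source B; pairs[i:j] with 0 ≤ i ≤ j is exactly (drop i).take (j - i)
def pvOuter (pairs : List (Option String × String × Bool)) (n i : Nat)
    (lines : List (List (Option String × String))) : List (List (Option String × String)) :=
  if h : i < n then
    let j := pvScan pairs n (i + 1)
    pvOuter pairs n j (lines ++ [((pairs.drop i).take (j - i)).map (fun p => (p.1, p.2.1))])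
  else lines
termination_by n - i
decreasing_by
  have := pvScan_ge pairs n (i + 1)
  omega

def group_ug_lines_py_alt (pairs : List (Option String × String × Bool)) : List (List (Option String × String)) :=
  pvOuter pairs pairs.length 0 []

-- ===== PRECONDITION & SPEC =====
def Spec_group_ug_lines_py (pairs : List (Option String × String × Bool)) (out : List (List (Option String × String))) : Prop := out = group_ug_lines_py_alt pairs
instance (pairs : List (Option String × String × Bool)) (out : List (List (Option String × String))) : Decidable (Spec_group_ug_lines_py pairs out) := by unfold Spec_group_ug_lines_py; infer_instance

-- ===== CLAIM (what is proved, stated in full; the proofs are below) =====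
def Claim_equal_group_ug_lines_py : Prop := ∀ (pairs : List (Option String × String × Bool)), Dom_group_ug_lines_py pairs → Spec_group_ug_lines_py pairs (group_ug_lines_py pairs)

-- ===== LEMMAS AND PROOFS =====

-- projection (chord, word, flag) ↦ (chord, word)
def pvPm (l : List (Option String × String × Bool)) : List (Option String × String) :=
  l.map (fun p => (p.1, p.2.1))

-- "not a line start" predicate used by the span decomposition
def pvNf (q : Option String × String × Bool) : Bool := !q.2.2

-- canonical grouping, the bridge between the two ports
def pvCanonGo (cur : List (Option String × String)) :
    List (Option String × String × Bool) → List (List (Option String × String))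
  | [] => [cur]
  | (c, w, s) :: rest =>
      if s then cur :: pvCanonGo [(c, w)] rest
      else pvCanonGo (cur ++ [(c, w)]) rest

-- span-based grouping (what B computes, stated structurally)
def pvChunks : List (Option String × String × Bool) → List (List (Option String × String × Bool))
  | [] => []
  | p :: rest => (p :: rest.takeWhile pvNf) :: pvChunks (rest.dropWhile pvNf)
termination_by l => l.length
decreasing_by
  have := List.length_dropWhile_le (p := pvNf) (l := rest)
  simp; omega

-- A's loop body, named for the invariant lemma
def pvStepA (st : List (List (Option String × String)) × List (Option String × String))
    (p : Option String × String × Bool) :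
    List (List (Option String × String)) × List (Option String × String) :=
  let (lines, current) := st
  let (chord, word, is_start) := p
  if is_start && !current.isEmpty then (lines ++ [current], [(chord, word)])
  else (lines, current ++ [(chord, word)])

theorem pvA_invariant (rest : List (Option String × String × Bool)) :
    ∀ (lines : List (List (Option String × String))) (cur : List (Option String × String)),
      cur ≠ [] →
      (if (rest.foldl pvStepA (lines, cur)).2.isEmpty then (rest.foldl pvStepA (lines, cur)).1
       else (rest.foldl pvStepA (lines, cur)).1 ++ [(rest.foldl pvStepA (lines, cur)).2]) =
        lines ++ pvCanonGo cur rest := by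
  induction rest with
  | nil =>
      intro lines cur hcur
      simp [pvCanonGo, List.isEmpty_iff, hcur]
  | cons p rest ih =>
      intro lines cur hcur
      obtain ⟨c, w, s⟩ := p
      have hne : cur.isEmpty = false := by simp [hcur]
      by_cases hs : s = true
      · simp only [List.foldl_cons, pvStepA, hs, hne, Bool.not_false, Bool.and_self, if_true]
        rw [ih (lines ++ [cur]) [(c, w)] (by simp)]
        simp [pvCanonGo]
      · have hs' : s = false := by simpa using hs
        simp only [List.foldl_cons, pvStepA, hs', Bool.false_and, Bool.false_eq_true, if_false]
        rw [ih lines (cur ++ [(c, w)]) (by simp)]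
        simp [pvCanonGo]

-- pvCanonGo expressed through the span decomposition
theorem pvCanon_chunks (rest : List (Option String × String × Bool)) :
    ∀ cur, pvCanonGo cur rest =
      (cur ++ pvPm (rest.takeWhile pvNf)) :: (pvChunks (rest.dropWhile pvNf)).map pvPm := by
  induction rest with
  | nil => intro cur; simp [pvCanonGo, pvPm, pvChunks]
  | cons p rest ih =>
      intro cur
      obtain ⟨c, w, s⟩ := p
      by_cases hs : s = true
      · simp only [pvCanonGo, hs, if_true]
        rw [ih [(c, w)]]
        simp [List.takeWhile, List.dropWhile, pvNf, pvChunks, pvPm]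
      · have hs' : s = false := by simpa using hs
        simp only [pvCanonGo, hs', Bool.false_eq_true, if_false]
        rw [ih (cur ++ [(c, w)])]
        simp [List.takeWhile, List.dropWhile, pvNf, pvPm]

-- take/drop at the takeWhile length recover takeWhile/dropWhile
theorem pv_take_takeWhile {α : Type} (f : α → Bool) :
    ∀ l : List α, l.take (l.takeWhile f).length = l.takeWhile f := by
  intro l
  induction l with
  | nil => rfl
  | cons a l ih =>
      by_cases h : f a = true
      · simp [List.takeWhile, h, ih]
      · simp [List.takeWhile, h]

theorem pv_drop_takeWhile {α : Type} (f : α → Bool) :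
    ∀ l : List α, l.drop (l.takeWhile f).length = l.dropWhile f := by
  intro l
  induction l with
  | nil => rfl
  | cons a l ih =>
      by_cases h : f a = true
      · simp [List.takeWhile, List.dropWhile, h, ih]
      · simp [List.takeWhile, List.dropWhile, h]

theorem pv_takeWhile_len_le {α : Type} (f : α → Bool) :
    ∀ l : List α, (l.takeWhile f).length ≤ l.length := by
  intro l
  induction l with
  | nil => simp
  | cons a l ih =>
      by_cases h : f a = true
      · simp [List.takeWhile, h]; omega
      · simp [List.takeWhile, h]

-- the inner scan returns start + length of the non-flagged prefix of the suffix
theorem pvScan_eq (pairs : List (Option String × String × Bool)) :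
    ∀ (rest : List (Option String × String × Bool)) (j : Nat),
      pairs.drop j = rest →
      pvScan pairs pairs.length j = j + (rest.takeWhile pvNf).length := by
  intro rest
  induction rest with
  | nil =>
      intro j hdrop
      have hj : pairs.length ≤ j := List.drop_eq_nil_iff.mp hdrop
      rw [pvScan, dif_neg (by omega)]
      simp [List.takeWhile]
  | cons q rest ih =>
      intro j hdrop
      have hj : j < pairs.length := by
        by_contra h
        rw [List.drop_eq_nil_of_le (by omega)] at hdrop
        simp at hdrop
      have hget : pairs[j]? = some q := by
        have := congrArg (fun l : List (Option String × String × Bool) => l[0]?) hdrop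
        simpa [List.getElem?_drop] using this
      have hdrop1 : pairs.drop (j + 1) = rest := by
        rw [← List.drop_drop, hdrop]
        simp
      by_cases hq : q.2.2 = true
      · rw [pvScan, dif_neg (by simp [hget, hq])]
        simp [List.takeWhile, pvNf, hq]
      · have hq' : q.2.2 = false := by simpa using hq
        rw [pvScan, dif_pos ⟨hj, by simp [hget, hq']⟩]
        rw [ih (j + 1) hdrop1]
        simp [List.takeWhile, pvNf, hq']
        omega

-- the outer loop accumulates exactly the projected chunks of the remaining suffix
theorem pvOuter_eq (pairs : List (Option String × String × Bool)) :
    ∀ (k i : Nat) (lines : List (List (Option String × String))),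
      pairs.length - i ≤ k →
      pvOuter pairs pairs.length i lines = lines ++ (pvChunks (pairs.drop i)).map pvPm := by
  intro k
  induction k with
  | zero =>
      intro i lines hk
      rw [pvOuter, dif_neg (by omega)]
      rw [List.drop_eq_nil_of_le (by omega)]
      simp [pvChunks]
  | succ k ih =>
      intro i lines hk
      by_cases hi : i < pairs.length
      · obtain ⟨p, rest, hdrop⟩ : ∃ p rest, pairs.drop i = p :: rest := by
          cases hd : pairs.drop i with
          | nil => exact absurd (List.drop_eq_nil_iff.mp hd) (by omega)
          | cons p rest => exact ⟨p, rest, rfl⟩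
        have hdrop1 : pairs.drop (i + 1) = rest := by
          rw [← List.drop_drop, hdrop]
          simp
        have hscan := pvScan_eq pairs rest (i + 1) hdrop1
        rw [pvOuter, dif_pos hi]
        have hlen : rest.length = pairs.length - (i + 1) := by
          have := congrArg List.length hdrop1
          simp at this
          omega
        have htwl : (rest.takeWhile pvNf).length ≤ rest.length := pv_takeWhile_len_le pvNf rest
        rw [ih _ _ (by rw [hscan]; omega)]
        rw [hscan, hdrop]
        have hslice :
            (pairs.drop i).take ((i + 1 + (rest.takeWhile pvNf).length) - i) =
              p :: rest.takeWhile pvNf := by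
          rw [hdrop]
          have : (i + 1 + (rest.takeWhile pvNf).length) - i = (rest.takeWhile pvNf).length + 1 := by omega
          rw [this]
          simp [pv_take_takeWhile pvNf rest]
        have hdropj : pairs.drop (i + 1 + (rest.takeWhile pvNf).length) = rest.dropWhile pvNf := by
          rw [← List.drop_drop, hdrop1, pv_drop_takeWhile]
        rw [hdrop] at hslice
        rw [hslice, hdropj]
        simp [pvChunks, pvPm]
      · rw [pvOuter, dif_neg hi]
        rw [List.drop_eq_nil_of_le (by omega)]
        simp [pvChunks]

theorem pv_ports_agree (pairs : List (Option String × String × Bool)) :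
    group_ug_lines_py pairs = group_ug_lines_py_alt pairs := by
  unfold group_ug_lines_py_alt
  rw [pvOuter_eq pairs pairs.length 0 [] (by omega)]
  simp only [List.drop_zero, List.nil_append]
  cases pairs with
  | nil => simp [group_ug_lines_py, pvChunks]
  | cons p rest =>
      obtain ⟨c, w, s⟩ := p
      have hA : group_ug_lines_py ((c, w, s) :: rest) = pvCanonGo [(c, w)] rest := by
        show (let st := ((c, w, s) :: rest).foldl pvStepA ([], [])
              if st.2.isEmpty then st.1 else st.1 ++ [st.2]) = pvCanonGo [(c, w)] rest
        have hstep : pvStepA ([], []) (c, w, s) = ([], [(c, w)]) := by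
          simp [pvStepA]
        simp only [List.foldl_cons, hstep]
        simpa using pvA_invariant rest [] [(c, w)] (by simp)
      rw [hA, pvCanon_chunks rest [(c, w)]]
      simp [pvChunks, pvPm]

-- ===== VERDICT (by name: the statement is the Claim_ definition above) =====
theorem group_ug_lines_py_spec : Claim_equal_group_ug_lines_py := by
  intro pairs _
  unfold Spec_group_ug_lines_py
  exact pv_ports_agree pairs
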